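-- pv_equiv track=rewrite | github.com/FlyingMedusa/LMT_Python | 015_files.py | get_vowels_number
-- ===== SOURCE A (Python) =====
-- def get_vowels_number(lines):
--     '''
--     input: a list of strings
--     output: a dictionary: key - line number, value - number of vowels
--     '''
--     vowels_by_row = {}
--     i = 1
--     for line in lines:
--         vowels_by_row[i] = 0
--         for character in line:
--             if character.lower() in 'aeiouy':
--                 vowels_by_row[i] += 1
--         i += 1
--     return vowels_by_row
-- ===== SOURCE B (Python) =====
-- def get_vowels_number(lines):
--     '''
--     input: a list of strings
--     output: a dictionary: key - line number, value - number of vowels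
--     '''
--     return {i: sum(line.lower().count(v) for v in 'aeiouy')
--             for i, line in enumerate(lines, 1)}
-- ===== Notes on version B (the rewrite author's own statement) =====
-- stated objective: simpler
-- what changed: Replaces the mutable dict with per-character membership increments by a one-line dict comprehension over enumerate(lines, 1) whose value is the sum of six str.count passes over the lowercased line.
import Mathlib
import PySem

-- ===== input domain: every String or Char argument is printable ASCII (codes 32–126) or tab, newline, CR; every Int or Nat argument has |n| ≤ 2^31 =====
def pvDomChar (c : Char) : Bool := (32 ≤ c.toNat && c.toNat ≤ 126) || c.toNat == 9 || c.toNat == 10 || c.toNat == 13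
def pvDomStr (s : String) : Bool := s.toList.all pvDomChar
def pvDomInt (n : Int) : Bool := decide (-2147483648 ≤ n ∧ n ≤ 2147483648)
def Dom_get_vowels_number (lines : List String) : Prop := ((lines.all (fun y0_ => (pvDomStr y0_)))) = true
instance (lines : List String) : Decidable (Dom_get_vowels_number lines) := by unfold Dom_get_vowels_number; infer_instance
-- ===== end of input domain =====

-- B replaces A's mutable dict built by per-character membership increments with a dict
-- comprehension over enumerate(lines, 1) whose value is a sum of six str.count passes
-- over the lowercased line (objective: simpler).

-- ===== PORT A =====
-- A's outer loop: state = (dict so far, next key i); per line insert key i with 0, then the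
-- inner per-character loop ('character.lower() in "aeiouy"' is a one-char-substring test =
-- PySem.Str.isIn; 'vowels_by_row[i] += 1' on the present key i is PySem.Dict.modify i 0 (· + 1))
def get_vowels_number (lines : List String) : List (Int × Int) :=
  (lines.foldl (fun (st : PySem.Dict Int Int × Int) line =>
      let d0 := st.1.insert st.2 0
      let d1 := line.toList.foldl (fun d c =>
        if PySem.Str.isIn (String.ofList [PySem.Chars.lowerChar c]) "aeiouy"
        then d.modify st.2 0 (· + 1) else d) d0
      (d1, st.2 + 1)) (PySem.Dict.empty, 1)).1.items

-- ===== PORT B =====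
def get_vowels_number_alt (lines : List String) : List (Int × Int) :=
  (PySem.List.enumerate lines 1).map (fun p =>
    (p.1, ("aeiouy".toList.map (fun v =>
      (PySem.Str.count (PySem.Str.lower p.2) (String.ofList [v]) : Int))).sum))

-- ===== PRECONDITION & SPEC =====
def Spec_get_vowels_number (lines : List String) (out : List (Int × Int)) : Prop := out = get_vowels_number_alt lines
instance (lines : List String) (out : List (Int × Int)) : Decidable (Spec_get_vowels_number lines out) := by unfold Spec_get_vowels_number; infer_instance

-- ===== CLAIM (what is proved, stated in full; the proofs are below) =====
def Claim_equal_get_vowels_number : Prop := ∀ (lines : List String), Dom_get_vowels_number lines → Spec_get_vowels_number lines (get_vowels_number lines)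

-- ===== LEMMAS AND PROOFS =====

theorem isIn_singleton (x : Char) :
    PySem.Str.isIn (String.ofList [x]) "aeiouy" = decide (x ∈ "aeiouy".toList) := by
  have h := PySem.Str.isIn_iff_infix (String.ofList [x]) "aeiouy"
  simp only [String.toList_ofList, List.singleton_infix_iff] at h
  rw [Bool.eq_iff_iff, decide_eq_true_eq]
  exact h

theorem go_singleton (v : Char) (s : List Char) : ∀ (fuel : Nat) (acc : Nat), s.length ≤ fuel →
    PySem.Chars.count.go [v] fuel s acc = acc + s.count v := by
  induction s with
  | nil => intro fuel acc _; cases fuel <;> simp [PySem.Chars.count.go]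
  | cons c t ih =>
    intro fuel acc hf
    cases fuel with
    | zero => simp at hf
    | succ fuel =>
      simp only [PySem.Chars.count.go]
      by_cases hc : v = c
      · subst hc
        simp [List.isPrefixOf, ih fuel (acc+1) (by simpa using hf)]
        omega
      · simp [List.isPrefixOf, hc, ih fuel acc (by simpa using hf), Ne.symm hc]

theorem count_singleton (s : List Char) (v : Char) : PySem.Chars.count s [v] = s.count v := by
  simp [PySem.Chars.count, go_singleton v s s.length 0 le_rfl]

theorem sum_counts (l : List Char) :
    (['a','e','i','o','u','y'].map (fun v => l.count v)).sum
      = l.countP (fun c => decide (c ∈ ['a','e','i','o','u','y'])) := by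
  induction l with
  | nil => simp
  | cons c l ih =>
    rw [List.countP_cons, ← ih]
    by_cases hm : c ∈ ['a','e','i','o','u','y']
    · fin_cases hm <;> simp [List.count_cons] <;> omega
    · have h1 : c ≠ 'a' := fun h => hm (by simp [h])
      have h2 : c ≠ 'e' := fun h => hm (by simp [h])
      have h3 : c ≠ 'i' := fun h => hm (by simp [h])
      have h4 : c ≠ 'o' := fun h => hm (by simp [h])
      have h5 : c ≠ 'u' := fun h => hm (by simp [h])
      have h6 : c ≠ 'y' := fun h => hm (by simp [h])
      simp [List.count_cons, hm, h1, h2, h3, h4, h5, h6]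

theorem inner_loop (l : List Char) (d : PySem.Dict Int Int) (i : Int) (n : Int) :
    l.foldl (fun d c =>
        if PySem.Str.isIn (String.ofList [PySem.Chars.lowerChar c]) "aeiouy"
        then d.modify i 0 (· + 1) else d) (d.insert i n)
      = d.insert i (n + (l.countP (fun c =>
          PySem.Str.isIn (String.ofList [PySem.Chars.lowerChar c]) "aeiouy") : Int)) := by
  induction l generalizing n with
  | nil => simp
  | cons c l ih =>
    rw [List.foldl_cons]
    by_cases hc : PySem.Str.isIn (String.ofList [PySem.Chars.lowerChar c]) "aeiouy"
    · rw [if_pos hc]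
      rw [show (d.insert i n).modify i 0 (· + 1) = d.insert i (n + 1) from by
        simp [PySem.Dict.modify, PySem.Dict.insert_insert_self]]
      rw [ih (n + 1)]
      congr 1
      rw [List.countP_cons, if_pos hc]
      push_cast
      ring
    · rw [if_neg hc, ih n]
      congr 1
      rw [List.countP_cons, if_neg hc]
      simp

theorem outer_loop (lines : List String) (d : PySem.Dict Int Int) (i : Int)
    (h : ∀ k ∈ d.keys, k < i) :
    ((lines.foldl (fun (st : PySem.Dict Int Int × Int) line =>
      let d0 := st.1.insert st.2 0
      let d1 := line.toList.foldl (fun d c =>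
        if PySem.Str.isIn (String.ofList [PySem.Chars.lowerChar c]) "aeiouy"
        then d.modify st.2 0 (· + 1) else d) d0
      (d1, st.2 + 1)) (d, i)).1).items
    = d.items ++ (PySem.List.enumerate lines i).map (fun p =>
        (p.1, (p.2.toList.countP (fun c =>
          PySem.Str.isIn (String.ofList [PySem.Chars.lowerChar c]) "aeiouy") : Int))) := by
  induction lines generalizing d i with
  | nil => simp
  | cons line rest ih =>
    rw [List.foldl_cons]
    have hni : d.contains i = false := by
      rw [PySem.Dict.contains_eq_decide_mem_keys]
      simp only [decide_eq_false_iff_not]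
      intro hk; exact absurd (h i hk) (lt_irrefl i)
    have hstep : rest.foldl (fun (st : PySem.Dict Int Int × Int) line =>
        let d0 := st.1.insert st.2 0
        let d1 := line.toList.foldl (fun d c =>
          if PySem.Str.isIn (String.ofList [PySem.Chars.lowerChar c]) "aeiouy"
          then d.modify st.2 0 (· + 1) else d) d0
        (d1, st.2 + 1))
        ((fun (st : PySem.Dict Int Int × Int) line =>
        let d0 := st.1.insert st.2 0
        let d1 := line.toList.foldl (fun d c =>
          if PySem.Str.isIn (String.ofList [PySem.Chars.lowerChar c]) "aeiouy"
          then d.modify st.2 0 (· + 1) else d) d0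
        (d1, st.2 + 1)) (d, i) line)
      = rest.foldl (fun (st : PySem.Dict Int Int × Int) line =>
        let d0 := st.1.insert st.2 0
        let d1 := line.toList.foldl (fun d c =>
          if PySem.Str.isIn (String.ofList [PySem.Chars.lowerChar c]) "aeiouy"
          then d.modify st.2 0 (· + 1) else d) d0
        (d1, st.2 + 1))
        (d.insert i ((0 : Int) + (line.toList.countP (fun c =>
          PySem.Str.isIn (String.ofList [PySem.Chars.lowerChar c]) "aeiouy") : Int)), i + 1) := by
      simp only
      rw [inner_loop]
    rw [hstep, ih _ (i + 1) (by
      intro k hk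
      rw [show (d.insert i ((0 : Int) + (line.toList.countP (fun c =>
          PySem.Str.isIn (String.ofList [PySem.Chars.lowerChar c]) "aeiouy") : Int))).keys
          = d.items.map (·.1) ++ [i] from by
        simp [PySem.Dict.keys, PySem.Dict.items_insert_of_not_contains d _ hni]] at hk
      rcases List.mem_append.1 hk with hk | hk
      · exact lt_trans (h k hk) (by omega)
      · simp at hk; omega)]
    rw [PySem.Dict.items_insert_of_not_contains d _ hni, PySem.List.enumerate_cons]
    simp

theorem line_value (s : String) :
    ("aeiouy".toList.map (fun v =>
      (PySem.Str.count (PySem.Str.lower s) (String.ofList [v]) : Int))).sum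
    = (s.toList.countP (fun c =>
        PySem.Str.isIn (String.ofList [PySem.Chars.lowerChar c]) "aeiouy") : Int) := by
  have hv : "aeiouy".toList = ['a','e','i','o','u','y'] := by decide
  simp only [hv, PySem.Str.count_eq, PySem.Str.toList_lower, String.toList_ofList,
    count_singleton, isIn_singleton]
  have h := congrArg (fun n : Nat => (n : Int)) (sum_counts (PySem.Chars.lower s.toList))
  simp only [PySem.Chars.lower, List.countP_map, Function.comp_def] at h ⊢
  simp only [List.map_cons, List.map_nil, List.sum_cons, List.sum_nil] at h ⊢
  push_cast at h
  omega

-- ===== VERDICT (by name: the statement is the Claim_ definition above) =====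
theorem get_vowels_number_spec : Claim_equal_get_vowels_number := by
  intro lines _
  unfold Spec_get_vowels_number get_vowels_number get_vowels_number_alt
  rw [outer_loop lines PySem.Dict.empty 1 (by
    intro k hk
    simp [PySem.Dict.empty, PySem.Dict.keys] at hk)]
  rw [show (PySem.Dict.empty : PySem.Dict Int Int).items = [] from rfl, List.nil_append]
  refine List.map_congr_left (fun p _ => ?_)
  exact congrArg (Prod.mk p.1) (line_value p.2).symm
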